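-- pv_equiv track=rewrite | github.com/ShreyasAwankar/pythonPractice | largeSmallSum.py | largeSmallSum
-- ===== SOURCE A (Python) =====
-- def largeSmallSum(arr):
--     if len(arr)<4:
--         return 0
--     evenArr = []
--     oddArr = []
--     for i in range (len(arr)):
--         if i%2==0:
--             evenArr.append(arr[i])
--         else:
--             oddArr.append(arr[i])
--     evenArr.sort()
--     oddArr.sort()
--     return evenArr[len(evenArr)-2] + oddArr[len(oddArr)-2]
-- ===== SOURCE B (Python) =====
-- def largeSmallSum(arr):
--     # Single pass: track the two largest values (with multiplicity) in each parity group.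
--     if len(arr) < 4:
--         return 0
--     e1 = e2 = o1 = o2 = None
--     even = True
--     for x in arr:
--         if even:
--             if e1 is None or x >= e1:
--                 e1, e2 = x, e1
--             elif e2 is None or x > e2:
--                 e2 = x
--         else:
--             if o1 is None or x >= o1:
--                 o1, o2 = x, o1
--             elif o2 is None or x > o2:
--                 o2 = x
--         even = not even
--     return e2 + o2
-- ===== Notes on version B (the rewrite author's own statement) =====
-- stated objective: alternative
-- what changed: Replaced build-two-lists-then-sort-and-index with a single pass over the array that tracks the two largest values (with multiplicity) of each parity group; O(n) instead of O(n log n), though a timing run did not consistently confirm a 1.5x speed-up.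
import Mathlib
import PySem

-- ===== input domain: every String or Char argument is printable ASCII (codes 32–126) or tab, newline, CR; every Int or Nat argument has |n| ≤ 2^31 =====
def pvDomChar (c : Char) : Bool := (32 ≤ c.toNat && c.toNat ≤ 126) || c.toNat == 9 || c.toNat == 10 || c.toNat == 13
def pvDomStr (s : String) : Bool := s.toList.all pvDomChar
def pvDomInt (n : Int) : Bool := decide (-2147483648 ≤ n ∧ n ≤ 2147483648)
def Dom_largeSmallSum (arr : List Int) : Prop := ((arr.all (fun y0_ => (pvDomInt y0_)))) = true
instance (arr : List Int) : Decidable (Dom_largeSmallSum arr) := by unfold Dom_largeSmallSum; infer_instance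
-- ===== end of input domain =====

-- B replaces "split by index parity, sort both halves, take the second-to-last of each"
-- with a single pass that tracks the two largest values (with multiplicity) per parity group.

-- ===== PORT A =====
-- one iteration of A's index loop: append arr[i] to the even or odd list
def pvPartStep (arr : List Int) (p : List Int × List Int) (i : Int) : List Int × List Int :=
  if PySem.Int.mod i 2 == 0 then (p.1 ++ [PySem.List.pyGetD arr i 0], p.2)
  else (p.1, p.2 ++ [PySem.List.pyGetD arr i 0])

def largeSmallSum (arr : List Int) : Int :=
  if arr.length < 4 then 0
  else
    let p := (PySem.List.pyRange 0 (arr.length : Int) 1).foldl (pvPartStep arr) ([], [])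
    let evenArr := PySem.List.sorted p.1 (fun x => x)
    let oddArr := PySem.List.sorted p.2 (fun x => x)
    PySem.List.pyGetD evenArr ((evenArr.length : Int) - 2) 0 +
      PySem.List.pyGetD oddArr ((oddArr.length : Int) - 2) 0

-- ===== PORT B =====
-- B's per-group update: (m1, m2) are the largest and second-largest seen so far (None = unset)
def pvTop2Step (m : Option Int × Option Int) (x : Int) : Option Int × Option Int :=
  match m with
  | (none, _) => (some x, none)
  | (some a, m2) =>
    if a ≤ x then (some x, some a)
    else
      match m2 with
      | none => (some a, some x)
      | some b => if b < x then (some a, some x) else (some a, some b)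

def largeSmallSum_alt (arr : List Int) : Int :=
  if arr.length < 4 then 0
  else
    let st := arr.foldl
      (fun (s : (Option Int × Option Int) × (Option Int × Option Int) × Bool) x =>
        if s.2.2 then (pvTop2Step s.1 x, s.2.1, !s.2.2)
        else (s.1, pvTop2Step s.2.1 x, !s.2.2))
      ((none, none), (none, none), true)
    -- len(arr) ≥ 4 guarantees both second-largest slots are set; `.getD 0` never takes its default
    st.1.2.getD 0 + st.2.1.2.getD 0

-- ===== PRECONDITION & SPEC =====
def Spec_largeSmallSum (arr : List Int) (out : Int) : Prop := out = largeSmallSum_alt arr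
instance (arr : List Int) (out : Int) : Decidable (Spec_largeSmallSum arr out) := by unfold Spec_largeSmallSum; infer_instance

-- ===== CLAIM (what is proved, stated in full; the proofs are below) =====
def Claim_equal_largeSmallSum : Prop := ∀ (arr : List Int), Dom_largeSmallSum arr → Spec_largeSmallSum arr (largeSmallSum arr)

-- ===== LEMMAS AND PROOFS =====

-- the even-indexed elements of a list
def evens : List Int → List Int
  | [] => []
  | [x] => [x]
  | x :: _ :: xs => x :: evens xs

-- the odd-indexed elements of a list
def odds (l : List Int) : List Int := evens l.tail

@[simp] lemma evens_nil : evens [] = [] := rfl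
@[simp] lemma odds_nil : odds [] = [] := rfl
@[simp] lemma odds_cons (x : Int) (xs : List Int) : odds (x :: xs) = evens xs := rfl
@[simp] lemma evens_cons (x : Int) (xs : List Int) : evens (x :: xs) = x :: odds xs := by
  cases xs <;> rfl

lemma evens_length : ∀ l : List Int, (evens l).length = (l.length + 1) / 2 := by
  intro l
  induction l using evens.induct with
  | case1 => simp
  | case2 x => simp [evens]
  | case3 x y xs ih => simp [evens, ih]; omega

lemma odds_length (l : List Int) : (odds l).length = l.length / 2 := by
  cases l with
  | nil => simp
  | cons x t => simp [evens_length]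

lemma evens_append_singleton : ∀ (l : List Int) (x : Int),
    evens (l ++ [x]) = if 2 ∣ l.length then evens l ++ [x] else evens l := by
  intro l
  induction l using evens.induct with
  | case1 => intro x; simp [evens]
  | case2 a => intro x; simp [evens]
  | case3 a b t ih =>
    intro x
    have hpar : (2 ∣ (a :: b :: t).length) ↔ (2 ∣ t.length) := by simp
    by_cases h : 2 ∣ t.length
    · simp only [List.cons_append, evens, ih, if_pos h, if_pos (hpar.mpr h)]
    · simp only [List.cons_append, evens, ih, if_neg h, if_neg (fun hh => h (hpar.mp hh))]

lemma odds_append_singleton (l : List Int) (x : Int) :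
    odds (l ++ [x]) = if 2 ∣ l.length then odds l else odds l ++ [x] := by
  cases l with
  | nil => simp
  | cons a t =>
    have : odds ((a :: t) ++ [x]) = evens (t ++ [x]) := rfl
    rw [this, evens_append_singleton]
    by_cases h : 2 ∣ t.length <;> simp [h, odds_cons] <;> omega

-- A's index loop builds exactly the even- and odd-indexed sublists of the prefix
lemma partition_loop (arr : List Int) : ∀ n : Nat, n ≤ arr.length →
    (PySem.List.pyRange 0 (n : Int) 1).foldl (pvPartStep arr) ([], [])
      = (evens (arr.take n), odds (arr.take n)) := by
  intro n
  induction n with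
  | zero =>
    intro _
    rw [show ((0 : Nat) : Int) = 0 by rfl, PySem.List.pyRange_one_eq_nil (le_refl 0)]
    simp
  | succ n ih =>
    intro h
    have h' : n ≤ arr.length := by omega
    have hcast : ((n + 1 : Nat) : Int) = (n : Int) + 1 := by push_cast; ring
    rw [hcast, PySem.List.pyRange_one_succ_right (by exact_mod_cast Nat.zero_le n),
        List.foldl_append, ih h']
    simp only [List.foldl_cons, List.foldl_nil]
    have hn : n < arr.length := by omega
    have hget : PySem.List.pyGetD arr (n : Int) 0 = arr[n] := by
      rw [PySem.List.pyGetD_natCast]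
      exact List.getD_eq_getElem arr 0 hn
    have htake : arr.take (n + 1) = arr.take n ++ [arr[n]] := by
      rw [List.take_succ]
      simp [List.getElem?_eq_getElem hn]
    have hlen : (arr.take n).length = n := by simp [List.length_take]; omega
    rw [htake, evens_append_singleton, odds_append_singleton, hlen]
    unfold pvPartStep
    have hmodc : PySem.Int.mod (n : Int) 2 = ((n % 2 : Nat) : Int) := by
      exact_mod_cast PySem.Int.mod_natCast n 2
    by_cases hpar : 2 ∣ n
    · have hmod : (PySem.Int.mod (n : Int) 2 == 0) = true := by
        rw [hmodc]; simp; omega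
      simp [hmod, hget, hpar] <;> omega
    · have hmod : (PySem.Int.mod (n : Int) 2 == 0) = false := by
        rw [hmodc]; simp; omega
      simp [hmod, hget, hpar] <;> omega

-- inserting x into a sorted list with ≥ 2 elements: how the last two entries change
lemma insertBy_last2 : ∀ (s : List Int), s.Pairwise (· ≤ ·) → 2 ≤ s.length → ∀ x : Int,
    ((PySem.List.insertBy (fun a b => decide (a < b)) x s).getD s.length 0
        = max x (s.getD (s.length - 1) 0))
    ∧ ((PySem.List.insertBy (fun a b => decide (a < b)) x s).getD (s.length - 1) 0
        = if s.getD (s.length - 1) 0 ≤ x then s.getD (s.length - 1) 0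
          else max x (s.getD (s.length - 2) 0)) := by
  intro s
  induction s with
  | nil => intro _ h; simp at h
  | cons c t ih =>
    intro hp h2 x
    rcases t with _ | ⟨d, t'⟩
    · simp at h2
    rcases t' with _ | ⟨e, t''⟩
    · -- s = [c, d]
      have hcd : c ≤ d := by simp at hp; exact hp
      by_cases h1 : x < c <;> by_cases h2' : x < d <;>
        simp [PySem.List.insertBy, h1, h2'] <;> omega
    · -- s = c :: t with t = d :: e :: t''
      have hp' : (d :: e :: t'').Pairwise (· ≤ ·) := hp.of_cons
      have hc : ∀ y ∈ d :: e :: t'', c ≤ y := (List.pairwise_cons.mp hp).1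
      obtain ⟨hA, hB⟩ := ih hp' (by simp) x
      obtain ⟨m, hm⟩ : ∃ m, t''.length = m := ⟨_, rfl⟩
      have htl : (d :: e :: t'').length = m + 2 := by simp [hm]
      rw [htl] at hA hB
      have r1 : m + 2 - 1 = m + 1 := rfl
      have r2 : m + 2 - 2 = m := rfl
      rw [r1] at hA hB
      rw [r2] at hB
      have hc1 : c ≤ (d :: e :: t'').getD (m + 1) 0 := by
        refine hc _ ?_
        rw [List.getD_eq_getElem _ 0 (by simp; omega)]
        exact List.getElem_mem _
      have hc2 : c ≤ (d :: e :: t'').getD m 0 := by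
        refine hc _ ?_
        rw [List.getD_eq_getElem _ 0 (by simp; omega)]
        exact List.getElem_mem _
      simp only [List.getD_cons_succ] at hA hB hc1 hc2
      have hlen3 : (c :: d :: e :: t'').length = m + 3 := by simp [hm]
      rw [hlen3]
      have r3 : m + 3 - 1 = m + 2 := rfl
      have r4 : m + 3 - 2 = m + 1 := rfl
      rw [r3, r4]
      by_cases hxc : x < c
      · have hins : PySem.List.insertBy (fun a b => decide (a < b)) x (c :: d :: e :: t'')
            = x :: c :: d :: e :: t'' := by simp [PySem.List.insertBy, hxc]
        rw [hins]
        constructor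
        · simp only [List.getD_cons_succ]
          omega
        · simp only [List.getD_cons_succ]
          rw [if_neg (by omega)]
          omega
      · have hins : PySem.List.insertBy (fun a b => decide (a < b)) x (c :: d :: e :: t'')
            = c :: PySem.List.insertBy (fun a b => decide (a < b)) x (d :: e :: t'') := by
          simp [PySem.List.insertBy, hxc]
        rw [hins]
        constructor
        · simp only [List.getD_cons_succ]
          exact hA
        · simp only [List.getD_cons_succ]
          exact hB

lemma pvTop2Step_some_some (a b x : Int) :
    pvTop2Step (some a, some b) x
      = if a ≤ x then (some x, some a)
        else if b < x then (some a, some x) else (some a, some b) := rfl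

lemma sorted_append_singleton (l : List Int) (x : Int) :
    PySem.List.sorted (l ++ [x]) (fun y => y)
      = PySem.List.insertBy (fun a b => decide (a < b)) x (PySem.List.sorted l (fun y => y)) := by
  rw [PySem.List.sorted_eq_foldl_insertBy, PySem.List.sorted_eq_foldl_insertBy,
      List.foldl_append]
  rfl

-- B's fold over one group computes the last two entries of the sorted group
lemma fold2_top2 : ∀ (l : List Int), 2 ≤ l.length →
    l.foldl pvTop2Step (none, none)
      = (some ((PySem.List.sorted l (fun y => y)).getD (l.length - 1) 0),
         some ((PySem.List.sorted l (fun y => y)).getD (l.length - 2) 0)) := by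
  intro l
  induction l using List.reverseRecOn with
  | nil => intro h; simp at h
  | append_singleton l x ih =>
    intro h2
    rcases l with _ | ⟨a, _ | ⟨b, t⟩⟩
    · simp at h2
    · -- l = [a]
      by_cases hax : a ≤ x
      · have hs : PySem.List.sorted [a, x] (fun y => y) = [a, x] :=
          PySem.List.sorted_eq_self_of_pairwise _ _ (by simp [hax])
        simp [pvTop2Step, hax, hs]
      · have hs : PySem.List.sorted [a, x] (fun y => y) = [x, a] :=
          PySem.List.sorted_eq_of_perm_of_pairwise_lt _ _ _
            (List.Perm.swap a x []) (by simp; omega)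
        simp [pvTop2Step, hax, hs]
    · -- l = a :: b :: t, length ≥ 2
      rw [List.foldl_append, ih (by simp), sorted_append_singleton]
      simp only [List.foldl_cons, List.foldl_nil]
      have hp := PySem.List.sorted_pairwise (a :: b :: t) (fun y => y)
      have hlen : (PySem.List.sorted (a :: b :: t) (fun y => y)).length = t.length + 2 := by
        rw [PySem.List.length_sorted]; simp
      obtain ⟨hA, hB⟩ := insertBy_last2 _ hp (by rw [hlen]; omega) x
      rw [hlen] at hA hB
      rw [show t.length + 2 - 1 = t.length + 1 from rfl] at hA hB
      rw [show t.length + 2 - 2 = t.length from rfl] at hB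
      rw [show ((a :: b :: t) ++ [x]).length - 1 = t.length + 2 by simp,
          show ((a :: b :: t) ++ [x]).length - 2 = t.length + 1 by simp,
          show (a :: b :: t).length - 1 = t.length + 1 by simp,
          show (a :: b :: t).length - 2 = t.length by simp]
      set s1 := (PySem.List.sorted (a :: b :: t) (fun y => y)).getD (t.length + 1) 0 with hs1
      set s2 := (PySem.List.sorted (a :: b :: t) (fun y => y)).getD t.length 0 with hs2
      rw [pvTop2Step_some_some, hA, hB]
      by_cases h1 : s1 ≤ x
      · rw [if_pos h1, if_pos h1, max_eq_left h1]
      · rw [if_neg h1, if_neg h1, max_eq_right (le_of_lt (lt_of_not_ge h1))]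
        by_cases hx2 : s2 < x
        · rw [if_pos hx2, max_eq_left (le_of_lt hx2)]
        · rw [if_neg hx2, max_eq_right (not_lt.mp hx2)]

-- B's single pass = the two-max fold over the even group and over the odd group
lemma foldB_interleave : ∀ (xs : List Int) (e o : Option Int × Option Int) (b : Bool),
    xs.foldl
      (fun (s : (Option Int × Option Int) × (Option Int × Option Int) × Bool) x =>
        if s.2.2 then (pvTop2Step s.1 x, s.2.1, !s.2.2)
        else (s.1, pvTop2Step s.2.1 x, !s.2.2)) (e, o, b)
    = ((if b then evens xs else odds xs).foldl pvTop2Step e,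
       (if b then odds xs else evens xs).foldl pvTop2Step o,
       if 2 ∣ xs.length then b else !b) := by
  intro xs
  induction xs with
  | nil => intro e o b; simp
  | cons x t ih =>
    intro e o b
    cases b
    · simp only [List.foldl_cons, Bool.false_eq_true, if_false, Bool.not_false]
      rw [ih]
      simp only [if_true, Bool.false_eq_true, if_false, evens_cons, odds_cons, List.foldl_cons]
      by_cases h : 2 ∣ t.length <;> simp [h] <;> omega
    · simp only [List.foldl_cons, if_true, Bool.not_true]
      rw [ih]
      simp only [Bool.false_eq_true, if_false, if_true, evens_cons, odds_cons, List.foldl_cons]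
      by_cases h : 2 ∣ t.length <;> simp [h] <;> omega

lemma pyGetD_len_sub_two (s : List Int) (h : 2 ≤ s.length) :
    PySem.List.pyGetD s ((s.length : Int) - 2) 0 = s.getD (s.length - 2) 0 := by
  have hidx : (((s.length : Int) - 2)).toNat = s.length - 2 := by omega
  rw [PySem.List.pyGetD_eq_getElem s 0 (by omega) (by omega),
      List.getD_eq_getElem s 0 (by omega)]
  simp [hidx]

-- ===== VERDICT (by name: the statement is the Claim_ definition above) =====
theorem largeSmallSum_spec : Claim_equal_largeSmallSum := by
  intro arr _
  unfold Spec_largeSmallSum largeSmallSum largeSmallSum_alt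
  by_cases h4 : arr.length < 4
  · simp [h4]
  · simp only [h4, if_false]
    have hpart := partition_loop arr arr.length (le_refl _)
    rw [List.take_length] at hpart
    rw [hpart]
    rw [foldB_interleave arr (none, none) (none, none) true]
    simp only [if_true]
    have he : 2 ≤ (evens arr).length := by rw [evens_length]; omega
    have ho : 2 ≤ (odds arr).length := by rw [odds_length]; omega
    rw [fold2_top2 (evens arr) he, fold2_top2 (odds arr) ho]
    have hle : (PySem.List.sorted (evens arr) (fun y => y)).length = (evens arr).length :=
      PySem.List.length_sorted _ _ _
    have hlo : (PySem.List.sorted (odds arr) (fun y => y)).length = (odds arr).length :=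
      PySem.List.length_sorted _ _ _
    rw [pyGetD_len_sub_two _ (by omega), pyGetD_len_sub_two _ (by omega)]
    simp [hle, hlo]
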